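-- pv_equiv track=rewrite | github.com/Thanhtinh06/baitapbigo | Blue_Bai2_Algorithmic/wrath.py | getCountPeopleLive
-- ===== SOURCE A (Python) =====
-- def getCountPeopleLive(lstWrath,n):
--   count = 0
--   j = n - 1
--   i = n - 1
--   while i >= 0:
--     j = min(j,i)
--     lastKillPos = max(0,i - lstWrath[i])
--     if j > lastKillPos:
--       count += (j-lastKillPos)
--       j = lastKillPos
--     i -= 1
--   return n - count
-- ===== SOURCE B (Python) =====
-- def getCountPeopleLive(lstWrath, n):
--     killed = 0
--     for p in range(n):
--         if any(i - lstWrath[i] <= p for i in range(p + 1, n)):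
--             killed += 1
--     return n - killed
-- ===== Notes on version B (the rewrite author's own statement) =====
-- stated objective: simpler
-- what changed: Replaces A's right-to-left pointer-merge of kill intervals (running merge pointer j plus a count) by a direct per-position check: position p is killed iff some later person i reaches it (i - lstWrath[i] <= p).
import Mathlib
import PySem

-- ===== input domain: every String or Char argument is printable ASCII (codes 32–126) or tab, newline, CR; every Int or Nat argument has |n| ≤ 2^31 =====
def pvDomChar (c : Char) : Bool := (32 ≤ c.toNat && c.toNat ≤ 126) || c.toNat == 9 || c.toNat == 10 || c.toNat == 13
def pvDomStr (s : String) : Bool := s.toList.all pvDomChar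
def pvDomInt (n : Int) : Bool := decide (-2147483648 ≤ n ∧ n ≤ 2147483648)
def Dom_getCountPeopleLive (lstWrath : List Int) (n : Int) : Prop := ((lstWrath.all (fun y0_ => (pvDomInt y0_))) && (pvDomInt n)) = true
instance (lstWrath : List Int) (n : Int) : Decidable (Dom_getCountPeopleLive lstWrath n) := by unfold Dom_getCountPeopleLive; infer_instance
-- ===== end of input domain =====

-- B replaces A's right-to-left pointer-merge of kill intervals by a direct per-position
-- check (position p dies iff some person i > p reaches it: i - lstWrath[i] <= p); objective:
-- simpler (B is O(n^2) vs A's O(n), not faster).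

-- ===== PORT A =====
-- lstWrath[i]; exact under Pre_ (index in range)
def wrathAt (lst : List Int) (i : Int) : Int := PySem.List.pyGetD lst i 0

def goWrath (lst : List Int) (count j i : Int) : Int :=
  if _h : 0 ≤ i then
    let j1 := min j i
    let lastKillPos := max 0 (i - wrathAt lst i)
    if lastKillPos < j1 then
      goWrath lst (count + (j1 - lastKillPos)) lastKillPos (i - 1)
    else
      goWrath lst count j1 (i - 1)
  else count
termination_by (i + 1).toNat
decreasing_by all_goals omega

def getCountPeopleLive (lstWrath : List Int) (n : Int) : Int :=
  n - goWrath lstWrath 0 (n - 1) (n - 1)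

-- ===== PORT B =====
-- any(i - lstWrath[i] <= p for i in range(p + 1, n))
def killsB (lst : List Int) (n p : Int) : Bool :=
  (PySem.List.pyRange (p + 1) n 1).any (fun i => decide (i - wrathAt lst i ≤ p))

def getCountPeopleLive_alt (lstWrath : List Int) (n : Int) : Int :=
  n - ((PySem.List.pyRange 0 n 1).countP (fun p => killsB lstWrath n p) : Int)

-- ===== PRECONDITION & SPEC =====
-- Pre_ excludes only n > len(lstWrath), where Python A raises IndexError (no input A returns on is excluded).
def Pre_getCountPeopleLive (lstWrath : List Int) (n : Int) : Prop := n ≤ (lstWrath.length : Int)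
instance (lstWrath : List Int) (n : Int) : Decidable (Pre_getCountPeopleLive lstWrath n) := by unfold Pre_getCountPeopleLive; infer_instance

def pvWitness_getCountPeopleLive : List Int × Int := ([2, 0, 1], 3)

def Spec_getCountPeopleLive (lstWrath : List Int) (n : Int) (out : Int) : Prop := out = getCountPeopleLive_alt lstWrath n
instance (lstWrath : List Int) (n : Int) (out : Int) : Decidable (Spec_getCountPeopleLive lstWrath n out) := by unfold Spec_getCountPeopleLive; infer_instance

-- ===== CLAIM (what is proved, stated in full; the proofs are below) =====
def Claim_equal_getCountPeopleLive : Prop := ∀ (lstWrath : List Int) (n : Int), Dom_getCountPeopleLive lstWrath n → Pre_getCountPeopleLive lstWrath n → Spec_getCountPeopleLive lstWrath n (getCountPeopleLive lstWrath n)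

-- ===== LEMMAS AND PROOFS =====

-- some person i' with p < i' <= i reaches position p
def covP (lst : List Int) (i p : Int) : Bool :=
  (PySem.List.pyRange (p + 1) (i + 1) 1).any (fun i' => decide (i' - wrathAt lst i' <= p))

lemma covP_iff (lst : List Int) (i p : Int) :
    covP lst i p = true ↔ ∃ i', p < i' ∧ i' ≤ i ∧ i' - wrathAt lst i' ≤ p := by
  simp only [covP, List.any_eq_true, PySem.List.mem_pyRange_one, decide_eq_true_eq]
  constructor
  · rintro ⟨i', ⟨h1, h2⟩, h3⟩; exact ⟨i', by omega, by omega, h3⟩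
  · rintro ⟨i', h1, h2, h3⟩; exact ⟨i', ⟨by omega, by omega⟩, h3⟩

-- number of positions p < j already reachable by some person i' with p < i' ≤ i
noncomputable def cntA (lst : List Int) (i j : Int) : ℕ :=
  ((Finset.Ico (0 : ℤ) i).filter (fun p => p < j ∧ covP lst i p = true)).card

lemma cntA_neg (lst : List Int) (i j : Int) (h : i < 0) : cntA lst i j = 0 := by
  unfold cntA
  rw [Finset.Ico_eq_empty (by omega)]
  simp

lemma cntA_step_skip (lst : List Int) (i j : Int) (h : 0 ≤ i)
    (hle : min j i ≤ max 0 (i - wrathAt lst i)) :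
    cntA lst i j = cntA lst (i - 1) (min j i) := by
  unfold cntA
  congr 1
  ext p
  simp only [Finset.mem_filter, Finset.mem_Ico, covP_iff]
  constructor
  · rintro ⟨⟨hp0, hpi⟩, hpj, i', hpi', hi'i, hw⟩
    have hne : i' ≠ i := by
      intro he; subst he
      have : max 0 (i' - wrathAt lst i') ≤ p := by omega
      omega
    exact ⟨⟨hp0, by omega⟩, by omega, i', hpi', by omega, hw⟩
  · rintro ⟨⟨hp0, hpi⟩, hpj, i', hpi', hi'i, hw⟩
    exact ⟨⟨hp0, by omega⟩, by omega, i', hpi', by omega, hw⟩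

lemma cntA_step_count (lst : List Int) (i j : Int) (h : 0 ≤ i)
    (hlt : max 0 (i - wrathAt lst i) < min j i) :
    cntA lst i j
      = (min j i - max 0 (i - wrathAt lst i)).toNat
        + cntA lst (i - 1) (max 0 (i - wrathAt lst i)) := by
  unfold cntA
  have hsplit :
      (Finset.Ico (0 : ℤ) i).filter (fun p => p < j ∧ covP lst i p = true)
      = Finset.Ico (max 0 (i - wrathAt lst i)) (min j i) ∪
        (Finset.Ico (0 : ℤ) (i - 1)).filter
          (fun p => p < max 0 (i - wrathAt lst i) ∧ covP lst (i - 1) p = true) := by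
    ext p
    simp only [Finset.mem_union, Finset.mem_filter, Finset.mem_Ico, covP_iff]
    constructor
    · rintro ⟨⟨hp0, hpi⟩, hpj, i', hpi', hi'i, hw⟩
      by_cases hcase : max 0 (i - wrathAt lst i) ≤ p
      · exact Or.inl ⟨hcase, by omega⟩
      · have hne : i' ≠ i := by
          intro he; subst he
          have : max 0 (i' - wrathAt lst i') ≤ p := by omega
          omega
        exact Or.inr ⟨⟨hp0, by omega⟩, by omega, i', hpi', by omega, hw⟩
    · rintro (⟨hlp, hpj1⟩ | ⟨⟨hp0, hpi⟩, hplow, i', hpi', hi'i, hw⟩)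
      · exact ⟨⟨by omega, by omega⟩, by omega, i, by omega, le_refl i, by omega⟩
      · exact ⟨⟨hp0, by omega⟩, by omega, i', hpi', by omega, hw⟩
  rw [hsplit, Finset.card_union_of_disjoint]
  · rw [Int.card_Ico]
  · rw [Finset.disjoint_left]
    rintro p hp hq
    simp only [Finset.mem_Ico] at hp
    simp only [Finset.mem_filter] at hq
    omega

lemma goWrath_eq (lst : List Int) (i j count : Int) :
    goWrath lst count j i = count + cntA lst i j := by
  rw [goWrath]
  dsimp only
  split_ifs with h hlt
  · rw [goWrath_eq lst (i - 1) (max 0 (i - wrathAt lst i))]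
    rw [cntA_step_count lst i j h hlt]
    have : (0:ℤ) ≤ min j i - max 0 (i - wrathAt lst i) := by omega
    push_cast
    omega
  · rw [goWrath_eq lst (i - 1) (min j i)]
    rw [cntA_step_skip lst i j h (by omega)]
  · rw [cntA_neg lst i j (by omega)]
    omega
termination_by (i + 1).toNat
decreasing_by all_goals omega

lemma countP_pyRange_eq_card (P : Int → Bool) (a b : Int) :
    (PySem.List.pyRange a b 1).countP P
      = ((Finset.Ico a b).filter (fun p => P p = true)).card := by
  by_cases hab : a < b
  · rw [PySem.List.pyRange_one_cons hab]
    rw [List.countP_cons]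
    rw [countP_pyRange_eq_card P (a + 1) b]
    have hIco : Finset.Ico a b = insert a (Finset.Ico (a + 1) b) := by
      exact Eq.symm (Finset.insert_Ico_add_one_left_eq_Ico hab)
    rw [hIco, Finset.filter_insert]
    by_cases hPa : P a = true
    · rw [if_pos hPa, if_pos hPa, Finset.card_insert_of_notMem (by simp)]
    · rw [if_neg hPa, if_neg hPa]
      simp
  · rw [PySem.List.pyRange_one_eq_nil (by omega)]
    rw [Finset.Ico_eq_empty (by omega)]
    simp
termination_by (b - a).toNat
decreasing_by all_goals omega

lemma killed_alt_eq (lst : List Int) (n : Int) :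
    (PySem.List.pyRange 0 n 1).countP (fun p => killsB lst n p)
      = cntA lst (n - 1) (n - 1) := by
  rw [countP_pyRange_eq_card]
  unfold cntA
  congr 1
  ext p
  simp only [Finset.mem_filter, Finset.mem_Ico, covP_iff, killsB,
    List.any_eq_true, PySem.List.mem_pyRange_one, decide_eq_true_eq]
  constructor
  · rintro ⟨⟨hp0, hpn⟩, i', ⟨hpi', hi'n⟩, hw⟩
    exact ⟨⟨hp0, by omega⟩, by omega, i', by omega, by omega, hw⟩
  · rintro ⟨⟨hp0, hpn⟩, hpj, i', hpi', hi'n, hw⟩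
    exact ⟨⟨hp0, by omega⟩, i', ⟨by omega, by omega⟩, hw⟩

-- ===== VERDICT (by name: the statement is the Claim_ definition above) =====
theorem getCountPeopleLive_spec : Claim_equal_getCountPeopleLive := by
  intro lstWrath n _ _
  unfold Spec_getCountPeopleLive getCountPeopleLive getCountPeopleLive_alt
  rw [goWrath_eq, killed_alt_eq]
  omega
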